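-- pv_equiv track=rewrite | github.com/yimadaOrz/bigdata | BDM_final/final_py633.py | processformat
-- ===== SOURCE A (Python) =====
-- def processformat(records):
--     for r in records:
--         if r[0][1]==2015:
--             yield (r[0][0], (r[1], 0, 0, 0, 0))
--         elif r[0][1]==2016:
--             yield (r[0][0], (0, r[1], 0, 0, 0))
--         elif r[0][1]==2017:
--             yield (r[0][0], (0, 0, r[1], 0, 0))
--         elif r[0][1]==2018:
--             yield (r[0][0], (0, 0, 0, r[1], 0))
--         elif r[0][1]==2019:
--             yield (r[0][0], (0, 0, 0, 0, r[1]))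
--         else:
--             yield (r[0][0], (0, 0, 0, 0, 0))
-- ===== SOURCE B (Python) =====
-- def processformat(records):
--     # Column-wise (transposed) construction: build the key column and the five
--     # year columns in separate passes, then zip them back into rows.
--     recs = list(records)
--     keys = [r[0][0] for r in recs]
--     c15, c16, c17, c18, c19 = (
--         [r[1] * (r[0][1] == y) for r in recs] for y in (2015, 2016, 2017, 2018, 2019)
--     )
--     yield from zip(keys, zip(c15, c16, c17, c18, c19))
-- ===== Notes on version B (the rewrite author's own statement) =====
-- stated objective: alternative
-- what changed: Replaces A's row-wise if/elif chain with a transposed, column-wise construction: the key column and the five year columns are each built in a separate pass using an indicator product v*(year==y), then zipped back into rows.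
import Mathlib
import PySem

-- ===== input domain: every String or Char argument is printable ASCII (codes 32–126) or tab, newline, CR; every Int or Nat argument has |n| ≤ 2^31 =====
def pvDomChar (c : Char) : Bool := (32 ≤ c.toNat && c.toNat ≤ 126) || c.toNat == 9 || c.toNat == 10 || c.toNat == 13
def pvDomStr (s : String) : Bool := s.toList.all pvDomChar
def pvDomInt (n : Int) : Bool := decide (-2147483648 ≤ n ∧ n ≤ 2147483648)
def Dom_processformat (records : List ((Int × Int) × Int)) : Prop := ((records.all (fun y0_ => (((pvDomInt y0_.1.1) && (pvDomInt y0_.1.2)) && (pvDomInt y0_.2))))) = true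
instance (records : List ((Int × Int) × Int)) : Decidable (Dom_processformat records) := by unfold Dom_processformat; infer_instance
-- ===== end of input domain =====

-- B builds the output column-wise (key column and five indicator-product year columns, zipped back into rows) instead of A's row-wise if/elif chain (objective: alternative).
-- ===== PORT A =====
-- literal transliteration of the generator: each record yields one pair chosen by the if/elif chain
def processformat (records : List ((Int × Int) × Int)) : List (Int × (Int × Int × Int × Int × Int)) :=
  records.map (fun r =>
    if r.1.2 == 2015 then (r.1.1, (r.2, 0, 0, 0, 0))
    else if r.1.2 == 2016 then (r.1.1, (0, r.2, 0, 0, 0))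
    else if r.1.2 == 2017 then (r.1.1, (0, 0, r.2, 0, 0))
    else if r.1.2 == 2018 then (r.1.1, (0, 0, 0, r.2, 0))
    else if r.1.2 == 2019 then (r.1.1, (0, 0, 0, 0, r.2))
    else (r.1.1, (0, 0, 0, 0, 0)))

-- ===== PORT B =====
-- one year column: [r[1] * (r[0][1] == y) for r in recs]  (bool coerces to 1/0)
def pvCol (recs : List ((Int × Int) × Int)) (y : Int) : List Int :=
  recs.map (fun r => r.2 * (if r.1.2 == y then 1 else 0))

-- transliteration of Source B: key column, five year columns, zipped back into rows
def processformat_alt (records : List ((Int × Int) × Int)) : List (Int × (Int × Int × Int × Int × Int)) :=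
  let keys := records.map (fun r => r.1.1)
  let c15 := pvCol records 2015
  let c16 := pvCol records 2016
  let c17 := pvCol records 2017
  let c18 := pvCol records 2018
  let c19 := pvCol records 2019
  keys.zip (c15.zip (c16.zip (c17.zip (c18.zip c19))))

-- ===== PRECONDITION & SPEC =====
def Spec_processformat (records : List ((Int × Int) × Int)) (out : List (Int × (Int × Int × Int × Int × Int))) : Prop := out = processformat_alt records
instance (records : List ((Int × Int) × Int)) (out : List (Int × (Int × Int × Int × Int × Int))) : Decidable (Spec_processformat records out) := by unfold Spec_processformat; infer_instance

-- ===== CLAIM (what is proved, stated in full; the proofs are below) =====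
def Claim_equal_processformat : Prop := ∀ (records : List ((Int × Int) × Int)), Dom_processformat records → Spec_processformat records (processformat records)

-- ===== LEMMAS AND PROOFS =====
theorem alt_cons (r : (Int × Int) × Int) (rs : List ((Int × Int) × Int)) :
    processformat_alt (r :: rs) =
      (r.1.1, (r.2 * (if r.1.2 == 2015 then 1 else 0),
               r.2 * (if r.1.2 == 2016 then 1 else 0),
               r.2 * (if r.1.2 == 2017 then 1 else 0),
               r.2 * (if r.1.2 == 2018 then 1 else 0),
               r.2 * (if r.1.2 == 2019 then 1 else 0))) :: processformat_alt rs := by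
  simp [processformat_alt, pvCol]

theorem head_eq (r : (Int × Int) × Int) :
    (if r.1.2 == 2015 then (r.1.1, (r.2, 0, 0, 0, 0))
    else if r.1.2 == 2016 then (r.1.1, (0, r.2, 0, 0, 0))
    else if r.1.2 == 2017 then (r.1.1, (0, 0, r.2, 0, 0))
    else if r.1.2 == 2018 then (r.1.1, (0, 0, 0, r.2, 0))
    else if r.1.2 == 2019 then (r.1.1, (0, 0, 0, 0, r.2))
    else (r.1.1, (0, 0, 0, 0, 0)) : Int × (Int × Int × Int × Int × Int)) =
      (r.1.1, (r.2 * (if r.1.2 == 2015 then 1 else 0),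
               r.2 * (if r.1.2 == 2016 then 1 else 0),
               r.2 * (if r.1.2 == 2017 then 1 else 0),
               r.2 * (if r.1.2 == 2018 then 1 else 0),
               r.2 * (if r.1.2 == 2019 then 1 else 0))) := by
  obtain ⟨⟨k, y⟩, v⟩ := r
  simp only []
  split_ifs with h1 h2 h3 h4 h5 <;> simp_all

theorem eq_all (records : List ((Int × Int) × Int)) :
    processformat records = processformat_alt records := by
  induction records with
  | nil => rfl
  | cons r rs ih =>
    rw [alt_cons]
    simp only [processformat, List.map_cons] at *
    rw [ih, head_eq]

-- ===== VERDICT (by name: the statement is the Claim_ definition above) =====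
theorem processformat_spec : Claim_equal_processformat := by
  intro records _
  exact eq_all records
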